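-- pv_equiv track=rewrite | github.com/thuslyandfurthermore/momokafan97 | home/flip/generateEquivalences.py | wrapWithZeros
-- ===== SOURCE A (Python) =====
-- def wrapWithZeros(bitmask, w, h):
--   # we're passing this an int, so we'll make it a binary string with the right amount of padding first of all
--   bitmask = format(bitmask, 'b').zfill(w*h)
--   bitarray = []
--
--   # this splits the string into w length chunks in a list
--   for i in range(h):
--     bitarray.append(bitmask[:w])
--     bitmask = bitmask[w:]
--
--   # zstring is padding for top and bottom
--   zstring = "".zfill(w + 2)
--   result = zstring
--   for i in range(len(bitarray)):
--     result = result + '0' + bitarray[i] + '0'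
--   result = result + zstring
--
--   # return as an int so we can do bitshifty stuff on it
--   return int(result, 2)
-- ===== SOURCE B (Python) =====
-- def wrapWithZeros(bitmask, w, h):
--     # Build the bordered bitmap directly as an integer: row t (counted from the
--     # bottom) of the w*h grid is the t-th w-bit field of the mask; it lands in a
--     # (w+2)-bit field with a zero bit on each side, above the all-zero bottom
--     # border row.  x >> k == x // 2**k and x & ((1 << w) - 1) == x % 2**w here.
--     mask = (1 << w) - 1
--     out = 0
--     for t in range(h):
--         out += ((bitmask >> w * t) & mask) << (w + 3 + t * (w + 2))
--     return out
-- ===== Notes on version B (the rewrite author's own statement) =====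
-- stated objective: faster
-- what changed: B computes the bordered bitmap purely with integer arithmetic (extracting each w-bit row with shifts/masks and adding it into its (w+2)-bit field) instead of A's building a binary string by repeated concatenation and re-parsing it with int(.,2); Pre_ excludes negative bitmask/width (A raises or slices accidentally) and bitmasks wider than the w*h grid, an unspecified corner where A happens to keep the top w*h bits while B uses the low ones.
-- outside the precondition, e.g. on wrapWithZeros(8, 1, 2): A returns 128, B returns 0; on wrapWithZeros(5, -1, 3): A returns 128, B raises ValueError
import Mathlib
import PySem

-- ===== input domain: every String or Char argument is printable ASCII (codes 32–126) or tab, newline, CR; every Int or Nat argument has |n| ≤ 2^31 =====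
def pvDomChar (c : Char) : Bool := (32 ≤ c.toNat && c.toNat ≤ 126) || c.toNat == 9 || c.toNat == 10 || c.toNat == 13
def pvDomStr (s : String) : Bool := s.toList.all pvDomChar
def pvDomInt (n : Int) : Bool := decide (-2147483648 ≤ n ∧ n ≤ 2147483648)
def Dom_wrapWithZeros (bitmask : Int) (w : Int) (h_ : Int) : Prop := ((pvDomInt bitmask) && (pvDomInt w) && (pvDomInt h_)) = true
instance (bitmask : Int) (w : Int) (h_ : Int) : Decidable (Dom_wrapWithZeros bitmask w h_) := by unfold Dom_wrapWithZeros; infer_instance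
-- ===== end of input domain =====

-- B replaces A's build-a-binary-string-and-reparse approach (quadratic repeated
-- concatenation) by pure integer arithmetic on the bitmask.


-- ===== PORT A =====
-- int(s, 2): exact on nonempty strings of '0'/'1' digits, which is what A's
-- `result` is on every input admitted by Pre_ (A raises ValueError elsewhere).
def pyIntBin (cs : List Char) : Int :=
  cs.foldl (fun a c => 2 * a + (if c = '1' then 1 else 0)) 0

def wrapWithZeros (bitmask : Int) (w : Int) (h_ : Int) : Int :=
  -- bitmask = format(bitmask, 'b').zfill(w*h)
  let bm0 := PySem.Chars.zfill (PySem.Int.toBinChars bitmask) (w * h_)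
  -- for i in range(h): bitarray.append(bitmask[:w]); bitmask = bitmask[w:]
  let st := (PySem.List.pyRange 0 h_).foldl
      (fun (st : List (List Char) × List Char) _ =>
        (st.1 ++ [PySem.List.slice st.2 none (some w)], PySem.List.slice st.2 (some w) none))
      ([], bm0)
  let bitarray := st.1
  -- zstring = "".zfill(w + 2); result = zstring
  let zstring := PySem.Chars.zfill [] (w + 2)
  -- for i in range(len(bitarray)): result = result + '0' + bitarray[i] + '0'
  let result := (PySem.List.pyRange 0 (PySem.List.len bitarray)).foldl
      (fun r i => r ++ '0' :: PySem.List.pyGetD bitarray i [] ++ ['0'])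
      zstring
  -- return int(result + zstring, 2)
  pyIntBin (result ++ zstring)

-- ===== PORT B =====
def wrapWithZeros_alt (bitmask : Int) (w : Int) (h_ : Int) : Int :=
  -- `x >> k` is exactly floor division by 2^k and `x & ((1 << w) - 1)` is exactly
  -- `x mod 2^w` for every Python int (two's complement), so they are ported with
  -- PySem.Int.floordiv / mod; the shift widths are nonnegative on every input
  -- where B's Python returns (B raises on w < 0), so `.toNat` is exact there.
  let mask := (2 : Int) ^ w.toNat - 1
  (PySem.List.pyRange 0 h_).foldl
    (fun (out : Int) t =>
      out + PySem.Int.mod (PySem.Int.floordiv bitmask ((2 : Int) ^ (w * t).toNat))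
              (mask + 1) * 2 ^ (w + 3 + t * (w + 2)).toNat)
    0

-- ===== PRECONDITION & SPEC =====
-- Pre_ excludes (a) negative bitmask on a real grid (w, h > 0), where A raises
-- ValueError (the '-' sign lands inside the string handed to int(.,2)); (b)
-- negative w, outside the natural grid domain, where A returns an accident of
-- negative-slice arithmetic while B's Python raises (negative shift count); and
-- (c) bitmasks wider than the w*h grid, an unspecified corner where A's zfill
-- never truncates so A accidentally keeps the TOP w*h bits while B reads the
-- low ones — both values are artefacts nobody would specify.  Degenerate grids
-- (h ≤ 0 or w = 0) are kept for every bitmask: both programs return 0 there.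
def Pre_wrapWithZeros (bitmask : Int) (w : Int) (h_ : Int) : Prop :=
  0 ≤ w ∧ (h_ ≤ 0 ∨ w = 0 ∨
    (0 ≤ bitmask ∧ ((PySem.Int.bitLength bitmask : Nat) : Int) ≤ w * h_))
instance (bitmask : Int) (w : Int) (h_ : Int) : Decidable (Pre_wrapWithZeros bitmask w h_) := by unfold Pre_wrapWithZeros; infer_instance

def pvWitness_wrapWithZeros : Int × Int × Int := (5, 2, 2)

def Spec_wrapWithZeros (bitmask : Int) (w : Int) (h_ : Int) (out : Int) : Prop := out = wrapWithZeros_alt bitmask w h_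
instance (bitmask : Int) (w : Int) (h_ : Int) (out : Int) : Decidable (Spec_wrapWithZeros bitmask w h_ out) := by unfold Spec_wrapWithZeros; infer_instance

-- ===== CLAIM (what is proved, stated in full; the proofs are below) =====
def Claim_equal_wrapWithZeros : Prop := ∀ (bitmask : Int) (w : Int) (h_ : Int), Dom_wrapWithZeros bitmask w h_ → Pre_wrapWithZeros bitmask w h_ → Spec_wrapWithZeros bitmask w h_ (wrapWithZeros bitmask w h_)

-- ===== LEMMAS AND PROOFS =====

-- `pyIntBin` under a foldl with arbitrary accumulator.
theorem pyIntBin_foldl (l : List Char) (a : Int) :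
    l.foldl (fun a c => 2 * a + (if c = '1' then 1 else 0)) a
      = a * 2 ^ l.length + pyIntBin l := by
  induction l generalizing a with
  | nil => simp [pyIntBin]
  | cons c l ih =>
      simp only [List.foldl_cons, List.length_cons, pyIntBin] at *
      rw [ih, ih (2 * 0 + _)]
      ring

theorem pyIntBin_append (xs ys : List Char) :
    pyIntBin (xs ++ ys) = pyIntBin xs * 2 ^ ys.length + pyIntBin ys := by
  unfold pyIntBin
  rw [List.foldl_append, pyIntBin_foldl]
  rfl

theorem pyIntBin_replicate (k : Nat) : pyIntBin (List.replicate k '0') = 0 := by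
  induction k with
  | zero => rfl
  | succ n ih =>
      rw [List.replicate_succ]
      show pyIntBin ([ '0' ] ++ List.replicate n '0') = 0
      rw [pyIntBin_append, ih]
      simp [pyIntBin]

def IsBin (l : List Char) : Prop := ∀ c ∈ l, c = '0' ∨ c = '1'

theorem pyIntBin_bounds {l : List Char} (h : IsBin l) :
    0 ≤ pyIntBin l ∧ pyIntBin l < 2 ^ l.length := by
  induction l with
  | nil => simp [pyIntBin]
  | cons c l ih =>
      have hc := h c (by simp)
      have hl : IsBin l := fun d hd => h d (by simp [hd])
      obtain ⟨h0, h1⟩ := ih hl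
      have : pyIntBin (c :: l) = (if c = '1' then 1 else 0) * 2 ^ l.length + pyIntBin l := by
        show pyIntBin ([c] ++ l) = _
        rw [pyIntBin_append]
        simp [pyIntBin]
      have hb0 : (if ('0':Char) = '1' then (1:Int) else 0) = 0 := by decide
      have hb1 : (if ('1':Char) = '1' then (1:Int) else 0) = 1 := by decide
      have hpos : (0:Int) ≤ 2 ^ l.length := by positivity
      rcases hc with hc | hc <;> subst hc
      · rw [this, hb0]
        refine ⟨by linarith, ?_⟩
        simp only [List.length_cons, pow_succ]
        nlinarith [h0, h1, hpos]
      · rw [this, hb1]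
        refine ⟨by linarith, ?_⟩
        simp only [List.length_cons, pow_succ]
        nlinarith [h0, h1, hpos]

-- binary digits of n, most significant first (= what format(n,'b') produces for n ≥ 0)
def bits2 (n : Nat) : List Char :=
  if h : n < 2 then [Nat.digitChar n]
  else bits2 (n / 2) ++ [Nat.digitChar (n % 2)]
  decreasing_by exact Nat.div_lt_self (by omega) (by omega)

theorem toDigitsCore_eq_bits2 :
    ∀ (fuel n : Nat) (acc : List Char), n < fuel →
      Nat.toDigitsCore 2 fuel n acc = bits2 n ++ acc := by
  intro fuel
  induction fuel with
  | zero => intro n acc h; omega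
  | succ f ih =>
      intro n acc h
      rw [Nat.toDigitsCore]
      by_cases hn : n < 2
      · have hdiv : n / 2 = 0 := Nat.div_eq_of_lt hn
        have hmod : n % 2 = n := Nat.mod_eq_of_lt hn
        simp only [hdiv, if_pos, reduceIte, hmod]
        rw [bits2, dif_pos hn]
        rfl
      · have hdiv : ¬ n / 2 = 0 := by omega
        have hlt : n / 2 < f := by omega
        simp only [hdiv, reduceIte]
        rw [ih (n / 2) _ hlt]
        conv_rhs => rw [bits2]
        rw [dif_neg hn, List.append_assoc]
        rfl

theorem toDigits_eq_bits2 (n : Nat) : Nat.toDigits 2 n = bits2 n := by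
  have := toDigitsCore_eq_bits2 (n + 1) n [] (by omega)
  simpa [Nat.toDigits] using this

theorem bits2_isBin (n : Nat) : IsBin (bits2 n) := by
  induction n using Nat.strong_induction_on with
  | _ n ih =>
      rw [bits2]
      by_cases h : n < 2
      · rw [dif_pos h]
        interval_cases n <;> (intro c hc; simp only [List.mem_singleton] at hc; subst hc; decide)
      · rw [dif_neg h]
        intro c hc
        rw [List.mem_append] at hc
        rcases hc with hc | hc
        · exact ih (n / 2) (Nat.div_lt_self (by omega) (by omega)) c hc
        · simp only [List.mem_singleton] at hc
          subst hc
          have h2 : n % 2 = 0 ∨ n % 2 = 1 := by omega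
          rcases h2 with hm | hm <;> rw [hm] <;> decide

theorem bits2_val (n : Nat) : pyIntBin (bits2 n) = (n : Int) := by
  induction n using Nat.strong_induction_on with
  | _ n ih =>
      rw [bits2]
      by_cases h : n < 2
      · rw [dif_pos h]
        interval_cases n <;> simp [pyIntBin, Nat.digitChar]
      · rw [dif_neg h, pyIntBin_append, ih (n / 2) (Nat.div_lt_self (by omega) (by omega))]
        have h2 : n % 2 = 0 ∨ n % 2 = 1 := by omega
        rcases h2 with hm | hm <;> rw [hm] <;>
          simp [pyIntBin, Nat.digitChar] <;> push_cast <;> omega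

theorem bits2_len_bounds (n : Nat) (hn : 0 < n) :
    0 < (bits2 n).length ∧
      2 ^ ((bits2 n).length - 1) ≤ n ∧ n < 2 ^ (bits2 n).length := by
  induction n using Nat.strong_induction_on with
  | _ n ih =>
      rw [bits2]
      by_cases h : n < 2
      · rw [dif_pos h]
        interval_cases n <;> simp
      · rw [dif_neg h]
        have hdlt : n / 2 < n := Nat.div_lt_self (by omega) (by omega)
        obtain ⟨hp, hlo, hhi⟩ := ih (n / 2) hdlt (by omega)
        set m := (bits2 (n / 2)).length with hm
        have hml : (bits2 (n / 2) ++ [Nat.digitChar (n % 2)]).length = m + 1 := by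
          simp [hm]
        rw [hml]
        have hpow : 2 ^ m = 2 * 2 ^ (m - 1) := by
          conv_lhs => rw [show m = (m - 1) + 1 by omega]
          ring
        refine ⟨by omega, ?_, ?_⟩
        · simpa using by omega
        · have : 2 ^ (m + 1) = 2 * 2 ^ m := by ring
          omega

-- format(b,'b') for b ≥ 0
theorem toBinChars_nonneg (b : Int) (hb : 0 ≤ b) :
    PySem.Int.toBinChars b = bits2 b.toNat := by
  rw [PySem.Int.toBinChars, if_neg (by omega), toDigits_eq_bits2]

theorem bits2_ne_nil (n : Nat) : bits2 n ≠ [] := by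
  rw [bits2]
  by_cases h : n < 2
  · rw [dif_pos h]; simp
  · rw [dif_neg h]; simp

theorem bits2_head_bin (n : Nat) :
    ∀ c, (bits2 n).head? = some c → ¬ (c = '+' ∨ c = '-') := by
  intro c hc hpm
  have := bits2_isBin n c (List.mem_of_mem_head? hc)
  rcases this with h | h <;> rcases hpm with h' | h' <;> subst h <;> simp_all

-- zfill on a binary-digit string is plain left padding with '0'
theorem zfill_bin (cs : List Char) (k : Int) (hne : cs ≠ [])
    (hh : ∀ c, cs.head? = some c → ¬ (c = '+' ∨ c = '-')) :
    PySem.Chars.zfill cs k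
      = List.replicate (max cs.length k.toNat - cs.length) '0' ++ cs := by
  rw [PySem.Chars.zfill.eq_def]
  by_cases hk : k ≤ (cs.length : Int)
  · rw [if_pos hk]
    have : max cs.length k.toNat = cs.length := by omega
    rw [this]
    simp
  · rw [if_neg hk]
    cases cs with
    | nil => exact absurd rfl hne
    | cons c rest =>
        have hcp := hh c (by simp)
        simp only [if_neg hcp]
        have hlen : max (c :: rest).length k.toNat = k.toNat := by
          simp only [List.length_cons]
          simp only [List.length_cons] at hk
          omega
        rw [hlen]

theorem isBin_replicate_append {cs : List Char} (m : Nat) (h : IsBin cs) :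
    IsBin (List.replicate m '0' ++ cs) := by
  intro c hc
  rw [List.mem_append] at hc
  rcases hc with hc | hc
  · left; exact (List.eq_of_mem_replicate hc)
  · exact h c hc

theorem isBin_sublist {l l' : List Char} (h : IsBin l) (hs : ∀ c ∈ l', c ∈ l) : IsBin l' :=
  fun c hc => h c (hs c hc)

-- ==== the chunking loop of A ====

theorem chunk_loop (w' : Nat) :
    ∀ (l : List Int) (acc : List (List Char)) (t : List Char),
      l.foldl (fun (st : List (List Char) × List Char) _ =>
          (st.1 ++ [PySem.List.slice st.2 none (some (w' : Int))],
           PySem.List.slice st.2 (some (w' : Int)) none))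
        (acc, t)
      = (acc ++ (List.range l.length).map (fun j => (t.drop (j * w')).take w'),
         t.drop (l.length * w')) := by
  intro l
  induction l with
  | nil => intro acc t; simp
  | cons x l ih =>
      intro acc t
      rw [List.foldl_cons]
      rw [PySem.List.slice_to t (by positivity), PySem.List.slice_from t (by positivity)]
      rw [ih]
      simp only [Int.toNat_natCast, List.length_cons]
      refine Prod.ext ?_ ?_
      · show acc ++ [t.take w'] ++ _ = acc ++ _
        rw [List.range_succ_eq_map, List.map_cons, List.append_assoc]
        congr 1
        rw [List.map_map]
        refine List.cons_eq_cons.mpr ⟨by simp, ?_⟩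
        apply List.map_congr_left
        intro j _
        simp only [Function.comp_apply, List.drop_drop, Nat.succ_eq_add_one]
        congr 2
        ring
      · show (t.drop w').drop (l.length * w') = _
        rw [List.drop_drop]
        congr 1
        ring

-- ==== the wrapping loop of A ====

theorem wrap_loop (w' : Nat) :
    ∀ (rows : List (List Char)) (init : List Char),
      (∀ r ∈ rows, IsBin r ∧ r.length = w') →
      pyIntBin (rows.foldl (fun r row => r ++ '0' :: row ++ ['0']) init)
        = rows.foldl (fun a row => a * 2 ^ (w' + 2) + 2 * pyIntBin row) (pyIntBin init) := by
  intro rows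
  induction rows with
  | nil => intro init _; rfl
  | cons row rows ih =>
      intro init hr
      obtain ⟨hbin, hlen⟩ := hr row (by simp)
      rw [List.foldl_cons, List.foldl_cons,
          ih _ (fun r h => hr r (by simp [h]))]
      congr 1
      have : init ++ '0' :: row ++ ['0'] = init ++ ([ '0' ] ++ row ++ ['0']) := by simp
      rw [this, pyIntBin_append, pyIntBin_append, pyIntBin_append]
      simp only [List.length_append, List.length_cons, List.length_nil, hlen]
      have h0 : pyIntBin ['0'] = 0 := by simp [pyIntBin]
      rw [h0]
      ring_nf

-- value of a w'-wide chunk of the padded string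
theorem chunk_val (s : List Char) (hbin : IsBin s) (w' j : Nat)
    (hle : (j + 1) * w' ≤ s.length) :
    (pyIntBin s) / 2 ^ (s.length - (j + 1) * w') % 2 ^ w'
      = pyIntBin ((s.drop (j * w')).take w') := by
  have hle' : j * w' + w' ≤ s.length := by
    rw [show j * w' + w' = (j + 1) * w' from by ring]
    exact hle
  set k := s.length - (j + 1) * w' with hk
  have hk' : k = s.length - (j * w' + w') := by rw [hk]; congr 1; ring
  set pre := s.take (j * w') with hpre
  set mid := (s.drop (j * w')).take w' with hmid
  set suf := s.drop ((j + 1) * w') with hsuf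
  have hlenpre : pre.length = j * w' := by
    rw [hpre, List.length_take]
    omega
  have hlenmid : mid.length = w' := by
    rw [hmid, List.length_take, List.length_drop]
    omega
  have hlensuf : suf.length = k := by
    rw [hsuf, List.length_drop]
  have hsplit : s = pre ++ mid ++ suf := by
    rw [hpre, hmid, hsuf, List.append_assoc]
    rw [show (j + 1) * w' = j * w' + w' by ring, ← List.drop_drop]
    rw [List.take_append_drop, List.take_append_drop]
  have hbinmid : IsBin mid := isBin_sublist hbin (fun c hc => by
    rw [hsplit]; simp [hc])
  have hbinsuf : IsBin suf := isBin_sublist hbin (fun c hc => by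
    rw [hsplit]; simp [hc])
  obtain ⟨hm0, hm1⟩ := pyIntBin_bounds hbinmid
  obtain ⟨hs0, hs1⟩ := pyIntBin_bounds hbinsuf
  rw [hlenmid] at hm1
  rw [hlensuf] at hs1
  have hval : pyIntBin s
      = (pyIntBin pre * 2 ^ w' + pyIntBin mid) * 2 ^ k + pyIntBin suf := by
    conv_lhs => rw [hsplit]
    rw [pyIntBin_append, pyIntBin_append, hlenmid, hlensuf]
  rw [hval, add_comm ((pyIntBin pre * 2 ^ w' + pyIntBin mid) * 2 ^ k) (pyIntBin suf)]
  rw [Int.add_mul_ediv_right _ _ (by positivity)]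
  rw [Int.ediv_eq_zero_of_lt hs0 hs1, zero_add]
  rw [show pyIntBin pre * 2 ^ w' + pyIntBin mid
        = pyIntBin mid + (2 : Int) ^ w' * pyIntBin pre by ring]
  rw [Int.add_mul_emod_self_left, Int.emod_eq_of_lt hm0 hm1]

-- the padded source string and its facts
theorem padded_facts (b : Int) (hb : 0 ≤ b) (P : Int) :
    IsBin (PySem.Chars.zfill (PySem.Int.toBinChars b) P)
    ∧ pyIntBin (PySem.Chars.zfill (PySem.Int.toBinChars b) P) = b
    ∧ (PySem.Chars.zfill (PySem.Int.toBinChars b) P).length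
        = max (bits2 b.toNat).length P.toNat := by
  rw [toBinChars_nonneg b hb]
  rw [zfill_bin _ _ (bits2_ne_nil _) (bits2_head_bin _)]
  refine ⟨isBin_replicate_append _ (bits2_isBin _), ?_, ?_⟩
  · rw [pyIntBin_append, pyIntBin_replicate, bits2_val]
    simp
    omega
  · simp only [List.length_append, List.length_replicate]
    omega

theorem pyRange_nil {h_ : Int} (h : h_ ≤ 0) : PySem.List.pyRange 0 h_ = [] := by
  simp [PySem.List.pyRange, show ¬ (0:Int) < h_ from by omega]

theorem zstring_facts (w : Int) (hw : 0 ≤ w) :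
    PySem.Chars.zfill ([] : List Char) (w + 2)
      = List.replicate (w.toNat + 2) '0' := by
  rw [PySem.Chars.zfill.eq_def]
  rw [if_neg (by simp only [List.length_nil, Nat.cast_zero]; omega)]
  show List.replicate (w + 2).toNat '0' = _
  congr 1
  omega

-- ===== main proof =====

theorem horner_sum (K : Int) (V : Nat → Int) :
    ∀ n : Nat, (List.range n).foldl (fun a j => a * K + 2 * V j) 0
      = ∑ j ∈ Finset.range n, 2 * V j * K ^ (n - 1 - j) := by
  intro n
  induction n with
  | zero => simp
  | succ n ih =>
      rw [List.range_succ, List.foldl_append, List.foldl_cons, List.foldl_nil, ih,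
          Finset.sum_range_succ, Finset.sum_mul]
      congr 1
      · apply Finset.sum_congr rfl
        intro j hj
        rw [Finset.mem_range] at hj
        rw [mul_assoc, ← pow_succ, show n - 1 - j + 1 = n + 1 - 1 - j from by omega]
      · simp

-- B's accumulation loop is a plain sum of its per-row terms
theorem foldl_add_range (f : Nat → Int) :
    ∀ n : Nat, (List.range n).foldl (fun a j => a + f j) 0
      = ∑ j ∈ Finset.range n, f j := by
  intro n
  induction n with
  | zero => simp
  | succ n ih =>
      rw [List.range_succ, List.foldl_append, List.foldl_cons, List.foldl_nil, ih,
          Finset.sum_range_succ]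

theorem wrapWithZeros_eq (b w h_ : Int) (hw : 0 ≤ w)
    (hfit : h_ ≤ 0 ∨ w = 0 ∨ (0 ≤ b ∧ b < 2 ^ (w * h_).toNat)) :
    wrapWithZeros b w h_ = wrapWithZeros_alt b w h_ := by
  simp only [wrapWithZeros, wrapWithZeros_alt]
  rcases le_or_gt h_ 0 with hh | hh
  · -- no rows at all: both sides are 0
    rw [pyRange_nil hh]
    simp only [List.foldl_nil]
    rw [show PySem.List.len ((([] : List (List Char)),
          PySem.Chars.zfill (PySem.Int.toBinChars b) (w * h_)).1) = 0 from by
        simp [PySem.List.len]]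
    rw [pyRange_nil (le_refl 0)]
    simp only [List.foldl_nil]
    rw [zstring_facts w hw, ← List.replicate_add, pyIntBin_replicate]
  · -- h_ > 0
    rcases hfit with hcon | hw0 | ⟨hb, hfit⟩
    · omega
    · -- w = 0: every row is the empty chunk, both sides are 0
      subst hw0
      set h' := h_.toNat with hh'
      have hcast : h_ = (h' : Int) := by omega
      have hcl := chunk_loop 0
      simp only [Nat.cast_zero] at hcl
      rw [hcast, PySem.List.pyRange_zero_natCast h', hcl _ [] _]
      simp only [List.length_map, List.length_range, List.nil_append, List.take_zero]
      rw [PySem.List.foldl_pyRange_pyGetD _ ([] : List Char)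
          (fun r row => r ++ '0' :: row ++ ['0']) _ (a := 0) (le_refl 0)]
      simp only [Int.toNat_zero, List.drop_zero]
      have hz := zstring_facts 0 (le_refl 0)
      simp only [Int.toNat_zero] at hz
      rw [hz, pyIntBin_append,
          wrap_loop 0 _ _ (by
            intro r hr
            rw [List.mem_map] at hr
            obtain ⟨j, hj, rfl⟩ := hr
            exact ⟨fun c hc => (nomatch hc), rfl⟩),
          pyIntBin_replicate, List.foldl_map,
          horner_sum ((2:Int) ^ (0 + 2)) (fun _ => pyIntBin ([] : List Char)) h']
      have h0 : pyIntBin ([] : List Char) = 0 := rfl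
      simp only [h0, mul_zero, zero_mul, Finset.sum_const_zero, add_zero]
      rw [List.foldl_map, foldl_add_range]
      apply Eq.symm
      apply Finset.sum_eq_zero
      intro t ht
      rw [PySem.Int.mod_eq_emod_of_pos (by norm_num)]
      simp
    set h' := h_.toNat with hh'
    set w' := w.toNat with hw'
    have hcast : h_ = (h' : Int) := by omega
    have hwcast : w = (w' : Int) := by omega
    set s := PySem.Chars.zfill (PySem.Int.toBinChars b) (w * h_) with hs
    obtain ⟨hsbin, hsval, hslen⟩ := padded_facts b hb (w * h_)
    rw [← hs] at hsbin hsval hslen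
    have hwh : (w * h_).toNat = w' * h' := by
      rw [hwcast, hcast, ← Nat.cast_mul, Int.toNat_natCast]
    rw [hwh] at hslen
    have hsle : w' * h' ≤ s.length := by omega
    -- A's first loop
    rw [hcast, hwcast, PySem.List.pyRange_zero_natCast h']
    rw [chunk_loop w' _ [] s]
    simp only [List.length_map, List.length_range, List.nil_append]
    set rows := (List.range h').map (fun j => (s.drop (j * w')).take w') with hrows
    have hrowfact : ∀ r ∈ rows, IsBin r ∧ r.length = w' := by
      intro r hr
      rw [hrows, List.mem_map] at hr
      obtain ⟨j, hj, rfl⟩ := hr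
      rw [List.mem_range] at hj
      have hjle : (j + 1) * w' ≤ s.length := by
        calc (j + 1) * w' ≤ h' * w' := Nat.mul_le_mul_right _ (by omega)
          _ = w' * h' := Nat.mul_comm _ _
          _ ≤ s.length := hsle
      have hjle' : j * w' + w' ≤ s.length := by
        rw [show j * w' + w' = (j + 1) * w' from by ring]
        exact hjle
      constructor
      · exact isBin_sublist hsbin (fun c hc =>
          List.mem_of_mem_drop (List.mem_of_mem_take hc))
      · rw [List.length_take, List.length_drop]
        omega
    -- A's second loop: index access over range(len) is a fold over rows
    rw [PySem.List.foldl_pyRange_pyGetD rows ([] : List Char)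
        (fun r row => r ++ '0' :: row ++ ['0'])
        (PySem.Chars.zfill [] ((w' : Int) + 2)) (a := 0) (le_refl 0)]
    simp only [Int.toNat_zero, List.drop_zero]
    -- value of the wrapped A string
    have hz := zstring_facts (w' : Int) (by positivity)
    simp only [Int.toNat_natCast] at hz
    rw [hz]
    rw [pyIntBin_append, wrap_loop w' rows _ hrowfact, pyIntBin_replicate,
        List.length_replicate, add_zero]
    -- A as a positional sum over the rows, bottom row first
    rw [hrows, List.foldl_map]
    rw [horner_sum ((2:Int) ^ (w' + 2)) (fun j => pyIntBin ((s.drop (j * w')).take w')) h']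
    rw [Finset.sum_mul]
    rw [← Finset.sum_range_reflect]
    -- B's loop as a sum
    rw [List.foldl_map, foldl_add_range]
    -- the sums agree termwise
    apply Finset.sum_congr rfl
    intro t ht
    rw [Finset.mem_range] at ht
    have hjle : (h' - 1 - t + 1) * w' ≤ s.length := by
      calc (h' - 1 - t + 1) * w' ≤ h' * w' := Nat.mul_le_mul_right _ (by omega)
        _ = w' * h' := Nat.mul_comm _ _
        _ ≤ s.length := hsle
    rw [← chunk_val s hsbin w' (h' - 1 - t) hjle, hsval]
    rw [show h' - 1 - (h' - 1 - t) = t from by omega]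
    -- B's primitives on this term
    have hwt : (((w' : Int)) * (t : Int)).toNat = w' * t := by
      rw [← Nat.cast_mul, Int.toNat_natCast]
    have hexpB : (((w' : Int)) + 3 + (t : Int) * ((w' : Int) + 2)).toNat
        = w' + 3 + t * (w' + 2) := by
      rw [show ((w' : Int)) + 3 + (t : Int) * ((w' : Int) + 2)
            = ((w' + 3 + t * (w' + 2) : Nat) : Int) from by push_cast; ring,
          Int.toNat_natCast]
    rw [hwt, hexpB]
    rw [show (2:Int) ^ w' - 1 + 1 = 2 ^ w' from by ring]
    rw [PySem.Int.mod_eq_emod_of_pos (by positivity),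
        PySem.Int.floordiv_eq_ediv_of_pos (by positivity)]
    -- match the two division exponents
    by_cases hb0 : b = 0
    · rw [hb0]
      simp only [Int.zero_ediv, Int.zero_emod, mul_zero, zero_mul]
    · have hbpos : 0 < b.toNat := by omega
      have hfit' : b < 2 ^ (w' * h') := by rwa [hwh] at hfit
      have hlenle : (bits2 b.toNat).length ≤ w' * h' := by
        obtain ⟨hp, hlo, hhi⟩ := bits2_len_bounds b.toNat hbpos
        by_contra hc
        push_neg at hc
        have h1 : 2 ^ (w' * h') ≤ 2 ^ ((bits2 b.toNat).length - 1) :=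
          Nat.pow_le_pow_right (by omega) (by omega)
        have h2 : b.toNat < 2 ^ (w' * h') := by
          have h3 : ((b.toNat : Int)) < ((2 ^ (w' * h') : Nat) : Int) := by
            rw [Int.toNat_of_nonneg hb]
            push_cast
            exact hfit'
          exact_mod_cast h3
        omega
      have hL : s.length = w' * h' := by omega
      rw [hL]
      have hsub : w' * h' - (h' - 1 - t + 1) * w' = w' * t := by
        have h1 : (h' - 1 - t + 1) * w' = (h' - t) * w' := by congr 1; omega
        rw [h1]
        have h2 : (h' - t) * w' + w' * t = w' * h' := by
          have : (h' - t) * w' + t * w' = h' * w' := by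
            rw [← Nat.add_mul]; congr 1; omega
          have := Nat.mul_comm t w'
          have := Nat.mul_comm h' w'
          omega
        omega
      rw [hsub]
      rw [show ((2:Int) ^ (w' + 2)) ^ t = (2:Int) ^ ((w' + 2) * t) from (pow_mul 2 _ t).symm,
          show w' + 3 + t * (w' + 2) = 1 + (w' + 2) * t + (w' + 2) from by ring,
          pow_add, pow_add, pow_add]
      ring

-- ===== VERDICT (by name: the statement is the Claim_ definition above) =====
theorem wrapWithZeros_spec : Claim_equal_wrapWithZeros := by
  intro b w h_ _ hpre
  unfold Spec_wrapWithZeros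
  obtain ⟨hw, hfit⟩ := hpre
  refine wrapWithZeros_eq b w h_ hw ?_
  rcases hfit with h | h | ⟨hb, h⟩
  · exact Or.inl h
  · exact Or.inr (Or.inl h)
  · refine Or.inr (Or.inr ⟨hb, ?_⟩)
    have h1 := PySem.Int.lt_two_pow_bitLength b
    have h2 : PySem.Int.bitLength b ≤ (w * h_).toNat := by omega
    have h3 : b.natAbs < 2 ^ (w * h_).toNat :=
      lt_of_lt_of_le h1 (Nat.pow_le_pow_right (by omega) h2)
    have h4 : ((b.natAbs : Int)) < ((2 ^ (w * h_).toNat : Nat) : Int) := by exact_mod_cast h3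
    rw [Int.natAbs_of_nonneg hb] at h4
    calc b < ((2 ^ (w * h_).toNat : Nat) : Int) := h4
      _ = 2 ^ (w * h_).toNat := by push_cast; ring
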